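-- pv_equiv track=rewrite | github.com/teru-max/fastapi | main-light.py | _nearest_scale_note
-- ===== SOURCE A (Python) =====
-- from typing import List, Dict, Any, Optional
--
-- def _nearest_scale_note(target: int, scale_pcs: List[int]) -> int:
--     """Find nearest MIDI note that belongs to the scale"""
--     if not (0 <= target <= 127):
--         target = max(0, min(127, target))
--
--     best_note = target
--     best_dist = 128
--     target_oct = target // 12
--
--     for oct_shift in range(target_oct - 2, target_oct + 3):
--         for pc in scale_pcs:
--             cand = pc + 12 * oct_shift
--             if 0 <= cand <= 127:
--                 dist = abs(cand - target)
--                 if dist < best_dist or (dist == best_dist and cand < best_note):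
--                     best_note = cand
--                     best_dist = dist
--     return best_note
-- ===== SOURCE B (Python) =====
-- def _nearest_scale_note(target, scale_pcs):
--     """Find nearest MIDI note that belongs to the scale (single pass, modular arithmetic)."""
--     if target < 0:
--         target = 0
--     elif target > 127:
--         target = 127
--     target_oct = target // 12
--     best_note, best_dist = target, 128
--     for pc in scale_pcs:
--         # octave shifts allowed by the window AND keeping the candidate in [0, 127]
--         lo = max(target_oct - 2, -(pc // 12))
--         hi = min(target_oct + 2, (127 - pc) // 12)
--         if lo <= hi:
--             o = (target - pc + 5) // 12  # ideal shift, ties toward the lower note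
--             if o < lo:
--                 o = lo
--             elif o > hi:
--                 o = hi
--             cand = pc + 12 * o
--             dist = abs(cand - target)
--             if dist < best_dist or (dist == best_dist and cand < best_note):
--                 best_note, best_dist = cand, dist
--     return best_note
-- ===== Notes on version B (the rewrite author's own statement) =====
-- stated objective: alternative
-- what changed: Replaced A's nested octave-window-by-pitch-class double loop with a single pass over the pitch classes that computes each class's best in-window candidate directly by floor-division arithmetic (clamping the ideal octave shift into the feasible interval).
import Mathlib
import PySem

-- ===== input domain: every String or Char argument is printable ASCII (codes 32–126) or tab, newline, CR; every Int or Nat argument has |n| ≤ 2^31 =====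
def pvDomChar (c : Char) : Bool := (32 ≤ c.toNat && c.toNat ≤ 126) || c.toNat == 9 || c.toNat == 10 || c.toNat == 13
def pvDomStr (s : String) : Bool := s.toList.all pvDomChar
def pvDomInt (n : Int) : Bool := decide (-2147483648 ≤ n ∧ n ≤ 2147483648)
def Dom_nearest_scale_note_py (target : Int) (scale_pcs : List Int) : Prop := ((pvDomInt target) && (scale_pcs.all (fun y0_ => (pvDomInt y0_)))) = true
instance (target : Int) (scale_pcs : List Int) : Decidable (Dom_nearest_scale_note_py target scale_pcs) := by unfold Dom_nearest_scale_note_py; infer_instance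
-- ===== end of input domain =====

-- B replaces A's 5-octave inner scan by direct modular arithmetic: one pass over the
-- pitch classes, computing each class's best in-window candidate in O(1) (objective: alternative/simpler per-pc logic).


-- ===== PORT A =====
-- abs(x) on Int (shared helper)
def pyabs (x : Int) : Int := if x < 0 then -x else x

def nearest_scale_note_py (target : Int) (scale_pcs : List Int) : Int :=
  let t := if ¬ (0 ≤ target ∧ target ≤ 127) then max 0 (min 127 target) else target
  let target_oct := PySem.Int.floordiv t 12
  ((PySem.List.pyRange (target_oct - 2) (target_oct + 3) 1).foldl
    (fun s oct_shift => scale_pcs.foldl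
      (fun s pc =>
        let cand := pc + 12 * oct_shift
        if 0 ≤ cand ∧ cand ≤ 127 then
          let dist := pyabs (cand - t)
          if dist < s.2 ∨ (dist = s.2 ∧ cand < s.1) then (cand, dist) else s
        else s) s)
    (t, 128)).1

-- ===== PORT B =====
def nearest_scale_note_py_alt (target : Int) (scale_pcs : List Int) : Int :=
  let t := if target < 0 then 0 else if 127 < target then 127 else target
  let target_oct := PySem.Int.floordiv t 12
  (scale_pcs.foldl
    (fun s pc =>
      let lo := max (target_oct - 2) (-(PySem.Int.floordiv pc 12))
      let hi := min (target_oct + 2) (PySem.Int.floordiv (127 - pc) 12)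
      if lo ≤ hi then
        let o0 := PySem.Int.floordiv (t - pc + 5) 12
        let o := if o0 < lo then lo else if hi < o0 then hi else o0
        let cand := pc + 12 * o
        let dist := pyabs (cand - t)
        if dist < s.2 ∨ (dist = s.2 ∧ cand < s.1) then (cand, dist) else s
      else s)
    (t, 128)).1

-- ===== PRECONDITION & SPEC =====
def Spec_nearest_scale_note_py (target : Int) (scale_pcs : List Int) (out : Int) : Prop := out = nearest_scale_note_py_alt target scale_pcs
instance (target : Int) (scale_pcs : List Int) (out : Int) : Decidable (Spec_nearest_scale_note_py target scale_pcs out) := by unfold Spec_nearest_scale_note_py; infer_instance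

-- ===== CLAIM (what is proved, stated in full; the proofs are below) =====
def Claim_equal_nearest_scale_note_py : Prop := ∀ (target : Int) (scale_pcs : List Int), Dom_nearest_scale_note_py target scale_pcs → Spec_nearest_scale_note_py target scale_pcs (nearest_scale_note_py target scale_pcs)

-- ===== LEMMAS AND PROOFS =====

-- the common "improve the running best" update of both programs
def stepN (t : Int) (s : Int × Int) (c : Int) : Int × Int :=
  if 0 ≤ c ∧ c ≤ 127 then
    if pyabs (c - t) < s.2 ∨ (pyabs (c - t) = s.2 ∧ c < s.1) then (c, pyabs (c - t)) else s
  else s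

lemma stepN_comm (t : Int) (s : Int × Int) (c c' : Int) :
    stepN t (stepN t s c) c' = stepN t (stepN t s c') c := by
  rcases s with ⟨bn, bd⟩
  simp only [stepN, pyabs]
  split_ifs <;> simp_all [Prod.ext_iff] <;> omega

lemma stepN_skip (t : Int) (s : Int × Int) (c : Int) (h : ¬ (0 ≤ c ∧ c ≤ 127)) :
    stepN t s c = s := by simp [stepN, h]

lemma stepN_keep (t x c : Int) (s : Int × Int) (hx : 0 ≤ x ∧ x ≤ 127)
    (h : ¬ (0 ≤ c ∧ c ≤ 127) ∨ pyabs (x - t) < pyabs (c - t) ∨ (pyabs (x - t) = pyabs (c - t) ∧ x ≤ c)) :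
    stepN t (stepN t s x) c = stepN t s x := by
  rcases s with ⟨bn, bd⟩
  simp only [stepN, pyabs] at *
  split_ifs <;> simp_all [Prod.ext_iff] <;> omega

lemma stepN_absorb (t x c : Int) (s : Int × Int) (hx : 0 ≤ x ∧ x ≤ 127)
    (h : pyabs (x - t) < pyabs (c - t) ∨ (pyabs (x - t) = pyabs (c - t) ∧ x ≤ c)) :
    stepN t (stepN t s c) x = stepN t s x := by
  rcases s with ⟨bn, bd⟩
  simp only [stepN, pyabs] at *
  split_ifs <;> simp_all [Prod.ext_iff] <;> omega

-- generic fold plumbing ------------------------------------------------------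
lemma foldl_const {σ α : Type} (l : List α) (s : σ) :
    l.foldl (fun s _ => s) s = s := by
  induction l generalizing s with
  | nil => rfl
  | cons a l ih => simp only [List.foldl_cons]; exact ih s

lemma foldl_pull {σ α : Type} (Q : σ → α → σ) (R : σ → σ)
    (h : ∀ s a, Q (R s) a = R (Q s a)) :
    ∀ (l : List α) (s : σ), l.foldl Q (R s) = R (l.foldl Q s) := by
  intro l
  induction l with
  | nil => intro s; rfl
  | cons a l ih => intro s; simp only [List.foldl_cons, h s a, ih (Q s a)]

lemma foldl_fuse {σ α : Type} (P Q : σ → α → σ)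
    (h : ∀ s a a', P (Q s a') a = Q (P s a) a') :
    ∀ (l : List α) (s : σ), l.foldl P (l.foldl Q s) = l.foldl (fun s a => P (Q s a) a) s := by
  intro l
  induction l with
  | nil => intro s; rfl
  | cons a l ih =>
      intro s
      simp only [List.foldl_cons]
      rw [← foldl_pull Q (fun s => P s a) (fun s a' => (h s a a').symm) l (Q s a)]
      exact ih (P (Q s a) a)

lemma foldl_interchange {σ α β : Type} (g : σ → Int → σ) (ψ : α → β → Int)
    (hg : ∀ s c c', g (g s c) c' = g (g s c') c) :
    ∀ (l1 : List α) (l2 : List β) (s : σ),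
      l1.foldl (fun s a => l2.foldl (fun s b => g s (ψ a b)) s) s
        = l2.foldl (fun s b => l1.foldl (fun s a => g s (ψ a b)) s) s := by
  intro l1
  induction l1 with
  | nil => intro l2 s; simp only [List.foldl_nil]; exact (foldl_const l2 s).symm
  | cons a l1 ih =>
      intro l2 s
      simp only [List.foldl_cons]
      rw [ih l2 (l2.foldl (fun s b => g s (ψ a b)) s)]
      exact foldl_fuse (fun s b => l1.foldl (fun s a => g s (ψ a b)) s)
        (fun s b => g s (ψ a b))
        (fun s b b' => foldl_pull (fun s a' => g s (ψ a' b)) (fun s => g s (ψ a b'))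
          (fun s a' => hg s (ψ a b') (ψ a' b)) l1 s) l2 s

-- fold of stepN over a list that contains a best in-range element x collapses
lemma foldl_stepN_keep (t x : Int) (hinr : 0 ≤ x ∧ x ≤ 127) :
    ∀ (l : List Int), (∀ c ∈ l, ¬ (0 ≤ c ∧ c ≤ 127) ∨ pyabs (x - t) < pyabs (c - t) ∨
       (pyabs (x - t) = pyabs (c - t) ∧ x ≤ c)) →
    ∀ s, l.foldl (stepN t) (stepN t s x) = stepN t s x := by
  intro l
  induction l with
  | nil => intro _ s; rfl
  | cons c l ih =>
      intro h s
      simp only [List.foldl_cons]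
      rw [stepN_keep t x c s hinr (h c (by simp))]
      exact ih (fun d hd => h d (by simp [hd])) s

lemma foldl_stepN_min (t x : Int) (l : List Int) (hx : x ∈ l) (hinr : 0 ≤ x ∧ x ≤ 127)
    (hbest : ∀ c ∈ l, ¬ (0 ≤ c ∧ c ≤ 127) ∨ pyabs (x - t) < pyabs (c - t) ∨
       (pyabs (x - t) = pyabs (c - t) ∧ x ≤ c)) :
    ∀ s, l.foldl (stepN t) s = stepN t s x := by
  induction l with
  | nil => cases hx
  | cons c l ih =>
      intro s
      rcases List.mem_cons.mp hx with rfl | hx'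
      · simp only [List.foldl_cons]
        exact foldl_stepN_keep t x hinr l (fun d hd => hbest d (by simp [hd])) s
      · simp only [List.foldl_cons]
        rw [ih hx' (fun d hd => hbest d (by simp [hd])) (stepN t s c)]
        rcases hbest c (by simp) with hout | hb
        · rw [stepN_skip t s c hout]
        · exact stepN_absorb t x c s hinr hb

-- arithmetic core: B's per-pc body equals A's scan of the five octave shifts
lemma per_pc (t toct pc : Int) (ht : 0 ≤ t ∧ t ≤ 127)
    (hto : toct = PySem.Int.floordiv t 12) (s : Int × Int) :
    (let lo := max (toct - 2) (-(PySem.Int.floordiv pc 12))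
     let hi := min (toct + 2) (PySem.Int.floordiv (127 - pc) 12)
     if lo ≤ hi then
       let o0 := PySem.Int.floordiv (t - pc + 5) 12
       let o := if o0 < lo then lo else if hi < o0 then hi else o0
       let cand := pc + 12 * o
       let dist := pyabs (cand - t)
       if dist < s.2 ∨ (dist = s.2 ∧ cand < s.1) then (cand, dist) else s
     else s)
    = [toct - 2, toct - 1, toct, toct + 1, toct + 2].foldl (fun s o => stepN t s (pc + 12 * o)) s := by
  dsimp only
  obtain ⟨h1, h1'⟩ := (PySem.Int.floordiv_eq_iff_of_pos (a := pc) (b := 12) (by norm_num)).mp rfl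
  obtain ⟨h2, h2'⟩ := (PySem.Int.floordiv_eq_iff_of_pos (a := 127 - pc) (b := 12) (by norm_num)).mp rfl
  obtain ⟨h3, h3'⟩ := (PySem.Int.floordiv_eq_iff_of_pos (a := t - pc + 5) (b := 12) (by norm_num)).mp rfl
  obtain ⟨h0, h0'⟩ := (PySem.Int.floordiv_eq_iff_of_pos (a := t) (b := 12) (by norm_num)).mp hto.symm
  set q1 := PySem.Int.floordiv pc 12 with hq1
  set q2 := PySem.Int.floordiv (127 - pc) 12 with hq2
  set q3 := PySem.Int.floordiv (t - pc + 5) 12 with hq3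
  rw [show [toct - 2, toct - 1, toct, toct + 1, toct + 2].foldl (fun s o => stepN t s (pc + 12 * o)) s
      = ([toct - 2, toct - 1, toct, toct + 1, toct + 2].map (fun o => pc + 12 * o)).foldl (stepN t) s
    from List.foldl_map.symm]
  by_cases hlh : max (toct - 2) (-q1) ≤ min (toct + 2) q2
  · rw [if_pos hlh]
    set ob := (if q3 < max (toct - 2) (-q1) then max (toct - 2) (-q1)
               else if min (toct + 2) q2 < q3 then min (toct + 2) q2 else q3) with hob
    have hchar : (max (toct - 2) (-q1) ≤ q3 ∧ q3 ≤ min (toct + 2) q2 ∧ ob = q3)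
        ∨ (q3 < max (toct - 2) (-q1) ∧ ob = max (toct - 2) (-q1))
        ∨ (min (toct + 2) q2 < q3 ∧ ob = min (toct + 2) q2) := by
      rw [hob]; split_ifs <;> omega
    have hrange : max (toct - 2) (-q1) ≤ ob ∧ ob ≤ min (toct + 2) q2 := by omega
    have hmin : ([toct - 2, toct - 1, toct, toct + 1, toct + 2].map (fun o => pc + 12 * o)).foldl
        (stepN t) s = stepN t s (pc + 12 * ob) := by
      apply foldl_stepN_min
      · have h5 : ob = toct - 2 ∨ ob = toct - 1 ∨ ob = toct ∨ ob = toct + 1 ∨ ob = toct + 2 := by omega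
        rcases h5 with h | h | h | h | h <;> rw [h] <;> simp
      · constructor <;> omega
      · intro c hc
        simp only [List.map_cons, List.map_nil, List.mem_cons, List.not_mem_nil, or_false] at hc
        rcases hc with rfl | rfl | rfl | rfl | rfl <;>
          · simp only [pyabs]
            split_ifs <;> omega
    rw [hmin, stepN, if_pos (show (0:Int) ≤ pc + 12 * ob ∧ pc + 12 * ob ≤ 127 by constructor <;> omega)]
  · rw [if_neg hlh]
    simp only [List.map_cons, List.map_nil, List.foldl_cons, List.foldl_nil]
    rw [stepN_skip t s _ (by omega), stepN_skip t s _ (by omega), stepN_skip t s _ (by omega),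
        stepN_skip t s _ (by omega), stepN_skip t s _ (by omega)]

-- ===== VERDICT (by name: the statement is the Claim_ definition above) =====
theorem nearest_scale_note_py_spec : Claim_equal_nearest_scale_note_py := by
  intro target pcs _
  unfold Spec_nearest_scale_note_py nearest_scale_note_py nearest_scale_note_py_alt
  dsimp only
  rw [show (if ¬ (0 ≤ target ∧ target ≤ 127) then max 0 (min 127 target) else target)
      = (if target < 0 then 0 else if 127 < target then 127 else target) by split_ifs <;> omega]
  set t := (if target < 0 then 0 else if 127 < target then 127 else target) with hts
  have ht : 0 ≤ t ∧ t ≤ 127 := by rw [hts]; split_ifs <;> omega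
  set toct := PySem.Int.floordiv t 12 with htoct
  have hr : PySem.List.pyRange (toct - 2) (toct + 3) 1
      = [toct - 2, toct - 1, toct, toct + 1, toct + 2] := by
    rw [PySem.List.pyRange_one]
    have h5 : (toct + 3 - (toct - 2)).toNat = 5 := by omega
    rw [h5]
    simp [List.range_succ]
    omega
  rw [hr]
  congr 1
  calc ([toct - 2, toct - 1, toct, toct + 1, toct + 2].foldl
          (fun s oct => pcs.foldl (fun s pc => stepN t s (pc + 12 * oct)) s) ((t : Int), (128 : Int)))
      = pcs.foldl (fun s pc => [toct - 2, toct - 1, toct, toct + 1, toct + 2].foldl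
          (fun s oct => stepN t s (pc + 12 * oct)) s) ((t : Int), (128 : Int)) :=
        foldl_interchange (stepN t) (fun oct pc => pc + 12 * oct) (stepN_comm t)
          [toct - 2, toct - 1, toct, toct + 1, toct + 2] pcs ((t : Int), (128 : Int))
    _ = _ := by
        have hfun : (fun (s : Int × Int) (pc : Int) =>
            [toct - 2, toct - 1, toct, toct + 1, toct + 2].foldl
              (fun s oct => stepN t s (pc + 12 * oct)) s)
          = (fun (s : Int × Int) (pc : Int) =>
             let lo := max (toct - 2) (-(PySem.Int.floordiv pc 12))
             let hi := min (toct + 2) (PySem.Int.floordiv (127 - pc) 12)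
             if lo ≤ hi then
               let o0 := PySem.Int.floordiv (t - pc + 5) 12
               let o := if o0 < lo then lo else if hi < o0 then hi else o0
               let cand := pc + 12 * o
               let dist := pyabs (cand - t)
               if dist < s.2 ∨ (dist = s.2 ∧ cand < s.1) then (cand, dist) else s
             else s) := by
          funext s pc
          exact (per_pc t toct pc ht htoct s).symm
        rw [hfun]
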